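-- pv_equiv track=rewrite | github.com/plantaeart/BLEO-React-18-Django-5 | backend/BLEO-backend/django-mongodb-api/utils/privacy_utils.py | _validate_domain_label
-- ===== SOURCE A (Python) =====
-- def _validate_domain_label(label: str) -> bool:
--     """
--     Validate a single domain label (part between dots)
--
--     Args:
--         label (str): Domain label to validate
--
--     Returns:
--         bool: True if label is valid
--     """
--     try:
--         if not label or len(label) < 1 or len(label) > 63:  # RFC 1035 limit
--             return False
--
--         # Cannot start or end with hyphen
--         if label.startswith('-') or label.endswith('-'):
--             return False
--
--         # Check allowed characters (alphanumeric and hyphens)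
--         allowed_chars = set('abcdefghijklmnopqrstuvwxyzABCDEFGHIJKLMNOPQRSTUVWXYZ0123456789-')
--         if not all(char in allowed_chars for char in label):
--             return False
--
--         return True
--
--     except Exception:
--         return False
-- ===== SOURCE B (Python) =====
-- import re
--
-- _LABEL_RE = re.compile(r'(?!-)[A-Za-z0-9-]{1,63}(?<!-)')
--
--
-- def _validate_domain_label(label: str) -> bool:
--     try:
--         return _LABEL_RE.fullmatch(label) is not None
--     except Exception:
--         return False
-- ===== Notes on version B (the rewrite author's own statement) =====
-- stated objective: idiomatic
-- what changed: Replaces the early-return chain and per-character set-membership loop with a single anchored regular expression (fullmatch of (?!-)[A-Za-z0-9-]{1,63}(?<!-)) inside the same broad try/except.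
import Mathlib
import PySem

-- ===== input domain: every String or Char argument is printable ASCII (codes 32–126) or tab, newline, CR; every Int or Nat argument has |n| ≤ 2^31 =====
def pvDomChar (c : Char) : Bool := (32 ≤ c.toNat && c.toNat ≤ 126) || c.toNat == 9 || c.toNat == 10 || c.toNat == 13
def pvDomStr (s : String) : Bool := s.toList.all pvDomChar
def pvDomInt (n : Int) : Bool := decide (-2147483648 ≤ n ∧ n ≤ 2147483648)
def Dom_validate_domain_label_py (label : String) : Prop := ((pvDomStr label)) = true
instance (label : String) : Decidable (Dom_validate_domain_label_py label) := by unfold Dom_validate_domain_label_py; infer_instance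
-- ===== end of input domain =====

-- B replaces A's early-return chain and per-character set scan with one anchored regular
-- expression (ported by hand below); same cost, more idiomatic. Equivalence of return values.

-- ===== PORT A =====
def pyAllowedChars : PySem.Set Char :=
  PySem.Set.ofList ("abcdefghijklmnopqrstuvwxyzABCDEFGHIJKLMNOPQRSTUVWXYZ0123456789-".toList)

def validate_domain_label_py (label : String) : Bool :=
  -- try/except: no statement in the body can raise on a str input, so the except arm is dead here
  if PySem.Str.len label == 0 || PySem.Str.len label < 1 || PySem.Str.len label > 63 then false
  else if PySem.Str.startswith label "-" || PySem.Str.endswith label "-" then false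
  else if !(label.toList.all (fun c => PySem.Set.contains pyAllowedChars c)) then false
  else true

-- ===== PORT B =====
def pyIsLDH (c : Char) : Bool :=
  ('A' ≤ c && c ≤ 'Z') || ('a' ≤ c && c ≤ 'z') || ('0' ≤ c && c ≤ '9') || c == '-'

def validate_domain_label_py_alt (label : String) : Bool :=
  -- re.fullmatch(r'(?!-)[A-Za-z0-9-]{1,63}(?<!-)', label) is not None, ported by hand
  -- (exact for every str: the anchored pattern matches iff length ∈ [1,63], every char in
  --  the class [A-Za-z0-9-], and neither the first nor the last char is '-')
  let cs := label.toList
  (cs.head? != some '-') && decide (1 ≤ cs.length) && decide (cs.length ≤ 63)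
    && cs.all pyIsLDH && (cs.getLast? != some '-')

-- ===== PRECONDITION & SPEC =====
def Spec_validate_domain_label_py (label : String) (out : Bool) : Prop := out = validate_domain_label_py_alt label
instance (label : String) (out : Bool) : Decidable (Spec_validate_domain_label_py label out) := by unfold Spec_validate_domain_label_py; infer_instance

-- ===== CLAIM (what is proved, stated in full; the proofs are below) =====
def Claim_equal_validate_domain_label_py : Prop := ∀ (label : String), Dom_validate_domain_label_py label → Spec_validate_domain_label_py label (validate_domain_label_py label)

-- ===== LEMMAS AND PROOFS =====

-- membership in A's literal character set coincides with B's range test, for every ASCII char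
set_option maxRecDepth 8192 in
theorem contains_eq_isLDH (c : Char) (h : c.toNat < 127) :
    PySem.Set.contains pyAllowedChars c = pyIsLDH c := by
  have hall : ∀ n : Nat, n < 127 →
      PySem.Set.contains pyAllowedChars (Char.ofNat n) = pyIsLDH (Char.ofNat n) := by decide
  have := hall c.toNat h
  rwa [Char.ofNat_toNat] at this

-- [a] is a prefix/suffix of l exactly when l's first/last element is a
theorem singleton_prefix_iff_head? (l : List Char) (a : Char) : [a] <+: l ↔ l.head? = some a := by
  cases l <;> simp [List.prefix_cons_iff, eq_comm]

theorem singleton_suffix_iff_getLast? (l : List Char) (a : Char) : [a] <:+ l ↔ l.getLast? = some a := by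
  rw [← List.reverse_prefix, ← List.head?_reverse]
  simpa using singleton_prefix_iff_head? l.reverse a

theorem all_congr_chars (l : List Char) (f g : Char → Bool) (h : ∀ c ∈ l, f c = g c) :
    l.all f = l.all g := by
  induction l with
  | nil => rfl
  | cons x xs ih =>
      simp only [List.all_cons, h x (by simp), ih (fun c hc => h c (by simp [hc]))]

-- ===== VERDICT (by name: the statement is the Claim_ definition above) =====
theorem validate_domain_label_py_spec : Claim_equal_validate_domain_label_py := by
  intro label hdom
  unfold Spec_validate_domain_label_py validate_domain_label_py validate_domain_label_py_alt
  have hdom' : ∀ c ∈ label.toList, c.toNat < 127 := by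
    intro c hc
    have := List.all_eq_true.mp hdom c hc
    simp only [pvDomChar, Bool.or_eq_true, Bool.and_eq_true, decide_eq_true_eq, beq_iff_eq] at this
    omega
  have hall : (label.toList.all (fun c => PySem.Set.contains pyAllowedChars c))
            = label.toList.all pyIsLDH :=
    all_congr_chars _ _ _ (fun c hc => contains_eq_isLDH c (hdom' c hc))
  have hsw : PySem.Str.startswith label "-" = (label.toList.head? == some '-') := by
    rw [Bool.eq_iff_iff]
    simp [PySem.Str.startswith_eq, PySem.Chars.startswith_iff, singleton_prefix_iff_head?]
  have hew : PySem.Str.endswith label "-" = (label.toList.getLast? == some '-') := by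
    rw [Bool.eq_iff_iff]
    simp [PySem.Str.endswith_eq, PySem.Chars.endswith_iff, singleton_suffix_iff_getLast?]
  rw [hsw, hew]
  simp only [PySem.Str.len_eq, hall]
  by_cases h1 : label.toList.head? = some '-' <;>
    by_cases h2 : label.toList.getLast? = some '-' <;>
    cases hA : label.toList.all pyIsLDH <;>
    simp [h1, h2, - String.length_eq_zero_iff] <;>
    (try rw [Bool.eq_iff_iff]) <;>
    simp [h1, h2, - String.length_eq_zero_iff] <;> omega
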